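-- pv_equiv track=rewrite | github.com/dandevjr/Python_OOP_Crud_System | Python_OOP_Crud_System/encrypt & decrypt/crush_digit.py | crush_digit
-- ===== SOURCE A (Python) =====
-- def crush_digit(text, shift):
--     result = ""
--     for char in text:
--         if char.isdigit():
--             result += str((int(char) + shift) % 10)
--         else:
--             result += char
--     return result
-- ===== SOURCE B (Python) =====
-- def crush_digit(text, shift):
--     table = {ord(str(d)): str((d + shift) % 10) for d in range(10)}
--     return text.translate(table)
-- ===== Notes on version B (the rewrite author's own statement) =====
-- stated objective: faster
-- what changed: Replaces the per-character loop with digit test, int()/str() conversions and string concatenation by a 10-entry translation table built once and applied with str.translate in C.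
import Mathlib
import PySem

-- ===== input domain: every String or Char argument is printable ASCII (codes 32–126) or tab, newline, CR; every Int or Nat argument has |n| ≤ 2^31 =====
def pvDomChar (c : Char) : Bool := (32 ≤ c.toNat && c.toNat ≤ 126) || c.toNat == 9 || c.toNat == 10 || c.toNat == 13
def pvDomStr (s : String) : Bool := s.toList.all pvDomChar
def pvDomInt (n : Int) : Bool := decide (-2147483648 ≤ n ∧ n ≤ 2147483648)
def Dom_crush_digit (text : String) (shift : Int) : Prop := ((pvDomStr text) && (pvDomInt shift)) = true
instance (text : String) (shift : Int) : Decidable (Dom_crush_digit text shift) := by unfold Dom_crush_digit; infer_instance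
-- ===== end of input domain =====

-- B replaces A's per-character digit test and conversion by a precomputed 10-entry
-- translation table applied in one pass (idiomatic str.translate).


-- ===== PORT A =====
-- literal port: for char in text: if char.isdigit(): result += str((int(char)+shift)%10) else result += char
-- int(char) is ported as (PySem.Int.ofChars? [char]).getD 0; the isdigit guard guarantees it is `some`.
def crush_digit (text : String) (shift : Int) : String :=
  String.mk (text.toList.foldl
    (fun result char =>
      if PySem.Chars.isdigit char then
        result ++ PySem.Int.toChars (PySem.Int.mod ((PySem.Int.ofChars? [char]).getD 0 + shift) 10)
      else
        result ++ [char])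
    [])

-- ===== PORT B =====
-- table = {ord(str(d)): str((d + shift) % 10) for d in range(10)}; ord(str(d)) is the code of
-- the single character str(d), ported as ((toChars d).headD ' ').toNat.
def crush_digit_table (shift : Int) : PySem.Dict Int (List Char) :=
  (PySem.List.pyRange 0 10 1).foldl
    (fun d dg =>
      d.insert (((PySem.Int.toChars dg).headD ' ').toNat : Int)
               (PySem.Int.toChars (PySem.Int.mod (dg + shift) 10)))
    PySem.Dict.empty

-- text.translate(table): each char is replaced by its table entry (a string), absent chars stay.
def crush_digit_alt (text : String) (shift : Int) : String :=
  String.mk (text.toList.flatMap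
    (fun c => (crush_digit_table shift).getD (c.toNat : Int) [c]))

-- ===== PRECONDITION & SPEC =====
def Spec_crush_digit (text : String) (shift : Int) (out : String) : Prop := out = crush_digit_alt text shift
instance (text : String) (shift : Int) (out : String) : Decidable (Spec_crush_digit text shift out) := by unfold Spec_crush_digit; infer_instance

-- ===== CLAIM (what is proved, stated in full; the proofs are below) =====
def Claim_equal_crush_digit : Prop := ∀ (text : String) (shift : Int), Dom_crush_digit text shift → Spec_crush_digit text shift (crush_digit text shift)

-- ===== LEMMAS AND PROOFS =====

set_option maxHeartbeats 4000000 in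
lemma table_eval (shift : Int) :
    crush_digit_table shift = PySem.Dict.mk
      [(48, PySem.Int.toChars (PySem.Int.mod (0 + shift) 10)),
       (49, PySem.Int.toChars (PySem.Int.mod (1 + shift) 10)),
       (50, PySem.Int.toChars (PySem.Int.mod (2 + shift) 10)),
       (51, PySem.Int.toChars (PySem.Int.mod (3 + shift) 10)),
       (52, PySem.Int.toChars (PySem.Int.mod (4 + shift) 10)),
       (53, PySem.Int.toChars (PySem.Int.mod (5 + shift) 10)),
       (54, PySem.Int.toChars (PySem.Int.mod (6 + shift) 10)),
       (55, PySem.Int.toChars (PySem.Int.mod (7 + shift) 10)),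
       (56, PySem.Int.toChars (PySem.Int.mod (8 + shift) 10)),
       (57, PySem.Int.toChars (PySem.Int.mod (9 + shift) 10))] := by
  unfold crush_digit_table
  rw [show PySem.List.pyRange 0 10 1 = [0,1,2,3,4,5,6,7,8,9] from by decide]
  rfl

lemma digit_cases (c : Char) (h : PySem.Chars.isdigit c = true) :
    c = '0' ∨ c = '1' ∨ c = '2' ∨ c = '3' ∨ c = '4' ∨
    c = '5' ∨ c = '6' ∨ c = '7' ∨ c = '8' ∨ c = '9' := by
  have hb : 48 ≤ c.toNat ∧ c.toNat ≤ 57 := by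
    simp [PySem.Chars.isdigit, Char.le_def] at h
    exact ⟨h.1, h.2⟩
  have hc := Char.ofNat_toNat c
  have hn : c.toNat = 48 ∨ c.toNat = 49 ∨ c.toNat = 50 ∨ c.toNat = 51 ∨ c.toNat = 52 ∨
      c.toNat = 53 ∨ c.toNat = 54 ∨ c.toNat = 55 ∨ c.toNat = 56 ∨ c.toNat = 57 := by omega
  rcases hn with hn|hn|hn|hn|hn|hn|hn|hn|hn|hn <;> rw [hn] at hc <;> rw [← hc] <;> decide

lemma pointwise (c : Char) (shift : Int) :
    (if PySem.Chars.isdigit c then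
        PySem.Int.toChars (PySem.Int.mod ((PySem.Int.ofChars? [c]).getD 0 + shift) 10)
      else [c])
    = (crush_digit_table shift).getD (c.toNat : Int) [c] := by
  by_cases h : PySem.Chars.isdigit c = true
  · rcases digit_cases c h with rfl|rfl|rfl|rfl|rfl|rfl|rfl|rfl|rfl|rfl <;>
      simp [table_eval, PySem.Dict.getD, PySem.Dict.get?_mk_cons, PySem.Chars.isdigit,
            show (PySem.Int.ofChars? ['0']) = some 0 from rfl,
            show (PySem.Int.ofChars? ['1']) = some 1 from rfl,
            show (PySem.Int.ofChars? ['2']) = some 2 from rfl,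
            show (PySem.Int.ofChars? ['3']) = some 3 from rfl,
            show (PySem.Int.ofChars? ['4']) = some 4 from rfl,
            show (PySem.Int.ofChars? ['5']) = some 5 from rfl,
            show (PySem.Int.ofChars? ['6']) = some 6 from rfl,
            show (PySem.Int.ofChars? ['7']) = some 7 from rfl,
            show (PySem.Int.ofChars? ['8']) = some 8 from rfl,
            show (PySem.Int.ofChars? ['9']) = some 9 from rfl]
  · have hnat : ¬ (48 ≤ c.toNat ∧ c.toNat ≤ 57) := by
      simpa [PySem.Chars.isdigit] using h
    rw [if_neg h, table_eval]
    simp only [PySem.Dict.getD, PySem.Dict.get?_mk_cons]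
    have : ∀ k : Int, 48 ≤ k → k ≤ 57 → (k == (c.toNat : Int)) = false := by
      intro k hk1 hk2
      simp only [beq_eq_false_iff_ne, ne_eq]
      intro hk
      apply hnat
      omega
    rw [this 48 (by norm_num) (by norm_num), this 49 (by norm_num) (by norm_num),
        this 50 (by norm_num) (by norm_num), this 51 (by norm_num) (by norm_num),
        this 52 (by norm_num) (by norm_num), this 53 (by norm_num) (by norm_num),
        this 54 (by norm_num) (by norm_num), this 55 (by norm_num) (by norm_num),
        this 56 (by norm_num) (by norm_num), this 57 (by norm_num) (by norm_num)]
    rfl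

-- ===== VERDICT (by name: the statement is the Claim_ definition above) =====
theorem crush_digit_spec : Claim_equal_crush_digit := by
  intro text shift _
  unfold Spec_crush_digit crush_digit crush_digit_alt
  congr 1
  have hfold : ∀ (l : List Char) (acc : List Char),
      l.foldl (fun result char =>
        if PySem.Chars.isdigit char then
          result ++ PySem.Int.toChars (PySem.Int.mod ((PySem.Int.ofChars? [char]).getD 0 + shift) 10)
        else result ++ [char]) acc
      = acc ++ l.flatMap (fun c => (crush_digit_table shift).getD (c.toNat : Int) [c]) := by
    intro l
    induction l with
    | nil => intro acc; simp
    | cons c rest ih =>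
      intro acc
      simp only [List.foldl, List.flatMap_cons]
      rw [ih]
      rw [← pointwise c shift]
      by_cases h : PySem.Chars.isdigit c = true <;> simp [h]
  simpa using hfold text.toList []
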